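-- pv_equiv track=rewrite | github.com/nicolaee2/python-lab | lab 3/p9.py | obstructed_seats
-- ===== SOURCE A (Python) =====
-- def obstructed_seats(stadium):
--     rows = len(stadium)
--     cols = len(stadium[0])
--
--     obstructed = []
--
--     for col in range(cols):
--         for row in range(1, rows):
--             if any(stadium[r][col] >= stadium[row][col] for r in range(row)):
--                 obstructed.append((row, col))
--
--     return obstructed
-- ===== SOURCE B (Python) =====
-- def obstructed_seats(stadium):
--     obstructed = []
--     for col in range(len(stadium[0])):
--         m = stadium[0][col]
--         for row in range(1, len(stadium)):
--             v = stadium[row][col]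
--             if m >= v:
--                 obstructed.append((row, col))
--             if v > m:
--                 m = v
--     return obstructed
-- ===== Notes on version B (the rewrite author's own statement) =====
-- stated objective: faster
-- what changed: Replaces the any()-scan over all rows above each seat with a running maximum of heights above per column, turning the per-column quadratic pass into a single linear pass.
import Mathlib
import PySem

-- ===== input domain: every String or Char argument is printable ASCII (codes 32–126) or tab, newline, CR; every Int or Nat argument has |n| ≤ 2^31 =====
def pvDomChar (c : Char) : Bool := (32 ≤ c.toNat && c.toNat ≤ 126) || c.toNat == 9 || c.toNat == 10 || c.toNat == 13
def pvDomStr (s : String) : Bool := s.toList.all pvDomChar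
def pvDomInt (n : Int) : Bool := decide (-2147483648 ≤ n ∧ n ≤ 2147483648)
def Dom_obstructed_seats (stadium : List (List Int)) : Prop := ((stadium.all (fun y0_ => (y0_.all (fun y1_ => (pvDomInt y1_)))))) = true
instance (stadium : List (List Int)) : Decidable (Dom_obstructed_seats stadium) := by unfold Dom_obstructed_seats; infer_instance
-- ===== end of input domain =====

-- B replaces A's per-seat any()-scan over all rows above with a single running maximum
-- of heights above per column (asymptotically faster: one pass per column).

-- ===== PORT A =====
def obstructed_seats (stadium : List (List Int)) : List (Int × Int) :=
  let rows := stadium.length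
  let cols := (stadium.headD []).length
  (List.range cols).foldl (fun acc col =>
    (List.range' 1 (rows - 1)).foldl (fun acc2 row =>
      if (List.range row).any
          (fun r => decide ((stadium.getD r []).getD col 0 ≥ (stadium.getD row []).getD col 0)) then
        acc2 ++ [((row : Int), (col : Int))]
      else acc2) acc) []

-- ===== PORT B =====
def obstructed_seats_alt (stadium : List (List Int)) : List (Int × Int) :=
  let cols := (stadium.headD []).length
  (List.range cols).foldl (fun acc col =>
    ((List.range' 1 (stadium.length - 1)).foldl (fun (st : Int × List (Int × Int)) row =>
      let v := (stadium.getD row []).getD col 0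
      let acc2 := if st.1 ≥ v then st.2 ++ [((row : Int), (col : Int))] else st.2
      let m := if v > st.1 then v else st.1
      (m, acc2)) (((stadium.getD 0 []).getD col 0), acc)).2) []

-- ===== PRECONDITION & SPEC =====
-- Pre_ excludes exactly the inputs where Python A raises: the empty stadium (stadium[0]
-- is an IndexError) and ragged stadiums with a row shorter than row 0 (IndexError on
-- stadium[row][col]); B raises there too.
def Pre_obstructed_seats (stadium : List (List Int)) : Prop :=
  stadium ≠ [] ∧ ∀ r ∈ stadium, (stadium.headD []).length ≤ r.length
instance (stadium : List (List Int)) : Decidable (Pre_obstructed_seats stadium) := by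
  unfold Pre_obstructed_seats; infer_instance
def pvWitness_obstructed_seats : List (List Int) := [[1, 2], [2, 1], [0, 3]]

def Spec_obstructed_seats (stadium : List (List Int)) (out : List (Int × Int)) : Prop := out = obstructed_seats_alt stadium
instance (stadium : List (List Int)) (out : List (Int × Int)) : Decidable (Spec_obstructed_seats stadium out) := by unfold Spec_obstructed_seats; infer_instance

-- ===== CLAIM (what is proved, stated in full; the proofs are below) =====
def Claim_equal_obstructed_seats : Prop := ∀ (stadium : List (List Int)), Dom_obstructed_seats stadium → Pre_obstructed_seats stadium → Spec_obstructed_seats stadium (obstructed_seats stadium)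

-- ===== LEMMAS AND PROOFS =====

-- running maximum of f over rows 0..k (B's variable m after scanning rows 1..k)
def pvM (f : Nat → Int) : Nat → Int
  | 0 => f 0
  | k + 1 => if f (k + 1) > pvM f k then f (k + 1) else pvM f k

-- A's any()-condition over rows 0..k is exactly "running max ≥ x"
theorem pvAny_eq_max (f : Nat → Int) (k : Nat) (x : Int) :
    ((List.range (k + 1)).any (fun r => decide (f r ≥ x)) = true) ↔ pvM f k ≥ x := by
  induction k with
  | zero => simp [pvM, List.range_succ]
  | succ k ih =>
    rw [List.range_succ, List.any_append]
    simp only [List.any_cons, List.any_nil, Bool.or_eq_true, decide_eq_true_eq, ih, pvM]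
    split_ifs with h
    · constructor
      · rintro (hh | hh | hf)
        · omega
        · omega
        · exact hf.elim
      · intro hh; exact Or.inr (Or.inl hh)
    · constructor
      · rintro (hh | hh | hf)
        · omega
        · omega
        · exact hf.elim
      · intro hh; exact Or.inl hh

-- per-column equivalence of the two inner loops, with B's state pinned to the running max
theorem pvCol (f : Nat → Int) (cv : Int) (b : Nat) : ∀ (a : Nat) (acc : List (Int × Int)),
    (List.range' (a + 1) b).foldl (fun acc2 row =>
      if (List.range row).any (fun r => decide (f r ≥ f row)) then
        acc2 ++ [((row : Int), cv)]
      else acc2) acc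
    = ((List.range' (a + 1) b).foldl (fun (st : Int × List (Int × Int)) row =>
        let v := f row
        let acc2 := if st.1 ≥ v then st.2 ++ [((row : Int), cv)] else st.2
        let m := if v > st.1 then v else st.1
        (m, acc2)) (pvM f a, acc)).2 := by
  induction b with
  | zero => intro a acc; simp
  | succ b ih =>
    intro a acc
    rw [List.range'_succ, List.foldl_cons, List.foldl_cons]
    by_cases h : pvM f a ≥ f (a + 1)
    · rw [if_pos ((pvAny_eq_max f a (f (a + 1))).mpr h)]
      show _ = ((List.range' (a + 1 + 1) b).foldl _
        ((if f (a + 1) > pvM f a then f (a + 1) else pvM f a),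
          if pvM f a ≥ f (a + 1) then acc ++ [(((a + 1 : Nat) : Int), cv)] else acc)).2
      rw [if_pos h]
      have hm : (if f (a + 1) > pvM f a then f (a + 1) else pvM f a) = pvM f (a + 1) := rfl
      rw [hm]
      exact ih (a + 1) _
    · rw [if_neg (fun hc => h ((pvAny_eq_max f a (f (a + 1))).mp hc))]
      show _ = ((List.range' (a + 1 + 1) b).foldl _
        ((if f (a + 1) > pvM f a then f (a + 1) else pvM f a),
          if pvM f a ≥ f (a + 1) then acc ++ [(((a + 1 : Nat) : Int), cv)] else acc)).2
      rw [if_neg h]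
      have hm : (if f (a + 1) > pvM f a then f (a + 1) else pvM f a) = pvM f (a + 1) := rfl
      rw [hm]
      exact ih (a + 1) _

-- ===== VERDICT (by name: the statement is the Claim_ definition above) =====
theorem obstructed_seats_spec : Claim_equal_obstructed_seats := by
  intro stadium _ _
  unfold Spec_obstructed_seats obstructed_seats obstructed_seats_alt
  have hstep :
      (fun (acc : List (Int × Int)) (col : Nat) =>
        (List.range' 1 (stadium.length - 1)).foldl (fun acc2 row =>
          if (List.range row).any
              (fun r => decide ((stadium.getD r []).getD col 0 ≥ (stadium.getD row []).getD col 0)) then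
            acc2 ++ [((row : Int), (col : Int))]
          else acc2) acc)
      = (fun (acc : List (Int × Int)) (col : Nat) =>
        ((List.range' 1 (stadium.length - 1)).foldl (fun (st : Int × List (Int × Int)) row =>
          let v := (stadium.getD row []).getD col 0
          let acc2 := if st.1 ≥ v then st.2 ++ [((row : Int), (col : Int))] else st.2
          let m := if v > st.1 then v else st.1
          (m, acc2)) (((stadium.getD 0 []).getD col 0), acc)).2) := by
    funext acc col
    exact pvCol (fun r => (stadium.getD r []).getD col 0) (col : Int) (stadium.length - 1) 0 acc
  simp only [hstep]
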